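-- pv_equiv track=rewrite | github.com/vmeta42/metatoc | violas_client/move_core_types/hash.py | common_prefix_bits_len
-- ===== SOURCE A (Python) =====
-- def uint8_to_bits(uint8):
--     return format(uint8, '8b').replace(' ', '0')
--
-- def common_prefix_bits_len(bytes1, bytes2):
--     assert len(bytes1) == len(bytes2)
--     bit_str1 = ''.join([uint8_to_bits(x) for x in bytes1])
--     bit_str2 = ''.join([uint8_to_bits(x) for x in bytes2])
--     for idx, bit in enumerate(bit_str1):
--         if bit != bit_str2[idx]:
--             return idx
--     return len(bit_str1)
-- ===== SOURCE B (Python) =====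
-- def common_prefix_bits_len(bytes1, bytes2):
--     assert len(bytes1) == len(bytes2)
--     x = int.from_bytes(bytes(bytes1), 'big') ^ int.from_bytes(bytes(bytes2), 'big')
--     if x == 0:
--         return 8 * len(bytes1)
--     return 8 * len(bytes1) - x.bit_length()
-- ===== Notes on version B (the rewrite author's own statement) =====
-- stated objective: alternative
-- what changed: Replaces the per-byte bit-string construction and character-by-character scan with one whole-value big-endian XOR and a single bit_length query.
-- outside the precondition, e.g. on common_prefix_bits_len([-5], [-5]): A returns 8, B raises ValueError; on common_prefix_bits_len([256], [0]): A returns 0, B raises ValueError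
import Mathlib
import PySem

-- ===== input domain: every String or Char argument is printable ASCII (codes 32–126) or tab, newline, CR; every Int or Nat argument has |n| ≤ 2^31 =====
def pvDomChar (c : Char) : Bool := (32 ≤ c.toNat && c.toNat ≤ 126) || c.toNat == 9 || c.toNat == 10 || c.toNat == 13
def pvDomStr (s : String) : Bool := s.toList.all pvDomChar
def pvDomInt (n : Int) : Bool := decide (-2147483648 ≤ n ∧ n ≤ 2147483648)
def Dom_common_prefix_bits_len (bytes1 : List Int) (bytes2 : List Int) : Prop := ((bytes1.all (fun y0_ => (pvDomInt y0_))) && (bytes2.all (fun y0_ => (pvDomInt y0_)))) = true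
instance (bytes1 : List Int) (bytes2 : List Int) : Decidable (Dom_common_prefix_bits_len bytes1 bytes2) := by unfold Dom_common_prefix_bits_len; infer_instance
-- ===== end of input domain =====

-- B replaces A's per-byte bit-string construction and char-by-char scan with one
-- whole-value big-endian XOR and a single bit_length query (objective: alternative algorithm).

-- ===== PORT A =====
-- format(n,'b') digits: binary digits of |n|, '-' prefix for negatives
-- structural (fuel n+1 always suffices since n halves each step)
def pvBinDigitsAux : Nat → Nat → List Char
  | 0, _ => []
  | fuel + 1, n =>
    if n < 2 then [if n = 1 then '1' else '0']
    else pvBinDigitsAux fuel (n / 2) ++ [if n % 2 = 1 then '1' else '0']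

def pvBinDigits (n : Nat) : List Char := pvBinDigitsAux (n + 1) n

-- format(uint8, '8b').replace(' ', '0'): right-align to width 8 with spaces, then spaces → '0'
def uint8_to_bits (n : Int) : List Char :=
  let s := if n < 0 then '-' :: pvBinDigits n.natAbs else pvBinDigits n.toNat
  List.replicate (8 - s.length) '0' ++ s

-- the 'for idx, bit in enumerate(bit_str1)' loop; bit_str2[idx] out of range = Python IndexError
-- (unreachable under Pre_); there the port returns 0
def pvScanA (s2 : List Char) (idx : Nat) : List Char → Int
  | [] => (idx : Int)
  | c :: rest =>
    match s2[idx]? with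
    | none => 0
    | some d => if c ≠ d then (idx : Int) else pvScanA s2 (idx + 1) rest

def common_prefix_bits_len (bytes1 : List Int) (bytes2 : List Int) : Int :=
  let bit_str1 := (bytes1.map uint8_to_bits).flatten
  let bit_str2 := (bytes2.map uint8_to_bits).flatten
  pvScanA bit_str2 0 bit_str1

-- ===== PORT B =====
-- int.from_bytes(bytes(bs), 'big')
def pvFromBytes (bs : List Int) : Nat :=
  bs.foldl (fun a b => 256 * a + b.toNat) 0

-- x.bit_length() is Nat.size x
def common_prefix_bits_len_alt (bytes1 : List Int) (bytes2 : List Int) : Int :=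
  let x := pvFromBytes bytes1 ^^^ pvFromBytes bytes2
  if x = 0 then 8 * (bytes1.length : Int)
  else 8 * (bytes1.length : Int) - (Nat.size x : Int)

-- ===== PRECONDITION & SPEC =====
-- Pre_ excludes lists of unequal length (A's assert raises) and lists with entries outside
-- 0..255, where A's format() produces accidental non-byte bit strings (or an IndexError)
-- while B's bytes() conversion raises ValueError.
def Pre_common_prefix_bits_len (bytes1 : List Int) (bytes2 : List Int) : Prop :=
  bytes1.length = bytes2.length ∧
  (∀ x ∈ bytes1, 0 ≤ x ∧ x < 256) ∧ (∀ x ∈ bytes2, 0 ≤ x ∧ x < 256)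
instance (bytes1 : List Int) (bytes2 : List Int) : Decidable (Pre_common_prefix_bits_len bytes1 bytes2) := by
  unfold Pre_common_prefix_bits_len; infer_instance

def pvWitness_common_prefix_bits_len : List Int × List Int := ([1, 2], [1, 3])

def Spec_common_prefix_bits_len (bytes1 : List Int) (bytes2 : List Int) (out : Int) : Prop := out = common_prefix_bits_len_alt bytes1 bytes2
instance (bytes1 : List Int) (bytes2 : List Int) (out : Int) : Decidable (Spec_common_prefix_bits_len bytes1 bytes2 out) := by unfold Spec_common_prefix_bits_len; infer_instance

-- ===== CLAIM (what is proved, stated in full; the proofs are below) =====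
def Claim_equal_common_prefix_bits_len : Prop := ∀ (bytes1 : List Int) (bytes2 : List Int), Dom_common_prefix_bits_len bytes1 bytes2 → Pre_common_prefix_bits_len bytes1 bytes2 → Spec_common_prefix_bits_len bytes1 bytes2 (common_prefix_bits_len bytes1 bytes2)

-- ===== LEMMAS AND PROOFS =====

-- big-endian bit string of the low L bits of v
def bitsBE : Nat → Nat → List Char
  | 0, _ => []
  | L + 1, v => (if v.testBit L then '1' else '0') :: bitsBE L v

theorem length_bitsBE (L v : Nat) : (bitsBE L v).length = L := by
  induction L generalizing v with
  | zero => rfl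
  | succ L ih => simp [bitsBE, ih]

-- index of first difference of two equal-length lists
def firstDiff : List Char → List Char → Nat
  | c :: r, d :: t => if c = d then 1 + firstDiff r t else 0
  | _, _ => 0

theorem pvScanA_eq (s2 : List Char) : ∀ (s1 : List Char) (idx : Nat),
    idx + s1.length ≤ s2.length →
    pvScanA s2 idx s1 = ((idx + firstDiff s1 (s2.drop idx) : Nat) : Int) := by
  intro s1
  induction s1 with
  | nil => intro idx h; simp [pvScanA, firstDiff]
  | cons c rest ih =>
    intro idx h
    have hlt : idx < s2.length := by simp at h; omega
    have hget : s2[idx]? = some s2[idx] := List.getElem?_eq_getElem hlt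
    have hdrop : s2.drop idx = s2[idx] :: s2.drop (idx + 1) :=
      List.drop_eq_getElem_cons hlt
    simp only [pvScanA, hget, hdrop]
    by_cases hc : c = s2[idx]
    · simp only [hc, ne_eq, not_true_eq_false, if_false]
      rw [ih (idx + 1) (by simp at h ⊢; omega)]
      simp only [firstDiff, if_true]
      congr 1; omega
    · simp [firstDiff, hc]

theorem mod_pow_eq_of_testBit_false {x L : Nat} (h : x.testBit L = false) :
    x % 2 ^ (L + 1) = x % 2 ^ L := by
  apply Nat.eq_of_testBit_eq
  intro i
  rw [Nat.testBit_mod_two_pow, Nat.testBit_mod_two_pow]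
  rcases Nat.lt_trichotomy i L with hi | rfl | hi
  · have hi1 : i < L + 1 := by omega
    simp [hi, hi1]
  · simp [h]
  · have h1 : ¬ i < L := by omega
    have h2 : ¬ i < L + 1 := by omega
    simp [h1, h2]

theorem firstDiff_bitsBE : ∀ (L v1 v2 : Nat),
    firstDiff (bitsBE L v1) (bitsBE L v2) = L - Nat.size ((v1 ^^^ v2) % 2 ^ L) := by
  intro L
  induction L with
  | zero => intro v1 v2; simp [bitsBE, firstDiff, Nat.mod_one]
  | succ L ih =>
    intro v1 v2
    have hxbit : (v1 ^^^ v2).testBit L = (v1.testBit L != v2.testBit L) := by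
      simp [Nat.testBit_xor]
    by_cases hb : v1.testBit L = v2.testBit L
    · -- equal heads
      have hxf : (v1 ^^^ v2).testBit L = false := by rw [hxbit, hb]; simp
      have hmod : (v1 ^^^ v2) % 2 ^ (L + 1) = (v1 ^^^ v2) % 2 ^ L :=
        mod_pow_eq_of_testBit_false hxf
      have hsz : Nat.size ((v1 ^^^ v2) % 2 ^ L) ≤ L :=
        Nat.size_le.2 (Nat.mod_lt _ (Nat.two_pow_pos L))
      simp only [bitsBE, hb]
      simp only [firstDiff, if_true, ih, hmod]
      omega
    · -- differing heads
      have hxt : (v1 ^^^ v2).testBit L = true := by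
        rw [hxbit]; cases h1 : v1.testBit L <;> cases h2 : v2.testBit L <;>
          simp_all
      have hxm : ((v1 ^^^ v2) % 2 ^ (L + 1)).testBit L = true := by
        rw [Nat.testBit_mod_two_pow]; simp [hxt]
      have hge : 2 ^ L ≤ (v1 ^^^ v2) % 2 ^ (L + 1) := Nat.ge_two_pow_of_testBit hxm
      have hsz1 : L < Nat.size ((v1 ^^^ v2) % 2 ^ (L + 1)) := Nat.lt_size.2 hge
      have hsz2 : Nat.size ((v1 ^^^ v2) % 2 ^ (L + 1)) ≤ L + 1 :=
        Nat.size_le.2 (Nat.mod_lt _ (Nat.two_pow_pos (L + 1)))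
      have hhead : (if v1.testBit L then '1' else '0') ≠ (if v2.testBit L then '1' else '0') := by
        cases h1 : v1.testBit L <;> cases h2 : v2.testBit L <;> simp_all
      simp only [bitsBE, firstDiff, if_neg hhead]
      omega

theorem bitsBE_split : ∀ (m L v : Nat), bitsBE (m + L) v = bitsBE m (v / 2 ^ L) ++ bitsBE L v := by
  intro m
  induction m with
  | zero => intro L v; simp [bitsBE]
  | succ m ih =>
    intro L v
    have : m + 1 + L = (m + L) + 1 := by omega
    rw [this]
    show (if v.testBit (m + L) then '1' else '0') :: bitsBE (m + L) v = _
    rw [ih]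
    have : (v / 2 ^ L).testBit m = v.testBit (m + L) := by
      rw [Nat.testBit_div_two_pow, Nat.add_comm]
    simp [bitsBE, this]

theorem bitsBE_mod : ∀ (L M v : Nat), L ≤ M → bitsBE L (v % 2 ^ M) = bitsBE L v := by
  intro L
  induction L with
  | zero => intro M v _; rfl
  | succ L ih =>
    intro M v h
    have hLM : L < M := by omega
    have : (v % 2 ^ M).testBit L = v.testBit L := by
      rw [Nat.testBit_mod_two_pow]; simp [hLM]
    simp [bitsBE, this, ih M v (by omega)]

set_option maxRecDepth 4096 in
theorem uint8_bits_byte : ∀ n : Nat, n < 256 → uint8_to_bits (n : Int) = bitsBE 8 n := by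
  decide

theorem foldl_fromBytes_shift : ∀ (bs : List Int) (acc : Nat),
    bs.foldl (fun a b => 256 * a + b.toNat) acc
      = acc * 256 ^ bs.length + bs.foldl (fun a b => 256 * a + b.toNat) 0 := by
  intro bs
  induction bs with
  | nil => intro acc; simp
  | cons b bs ih =>
    intro acc
    simp only [List.foldl_cons, List.length_cons, Nat.mul_zero, Nat.zero_add]
    rw [ih (256 * acc + b.toNat), ih b.toNat]
    ring

theorem fromBytes_lt : ∀ bs : List Int, (∀ x ∈ bs, 0 ≤ x ∧ x < 256) →
    pvFromBytes bs < 2 ^ (8 * bs.length) := by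
  intro bs
  induction bs with
  | nil => intro _; simp [pvFromBytes]
  | cons b bs ih =>
    intro h
    have hb := h b (by simp)
    have hbs := ih (fun x hx => h x (by simp [hx]))
    have hbn : b.toNat < 256 := by omega
    simp only [pvFromBytes, List.foldl_cons, List.length_cons, Nat.mul_zero, Nat.zero_add] at *
    rw [foldl_fromBytes_shift bs b.toNat]
    have h256 : (256 : Nat) ^ bs.length = 2 ^ (8 * bs.length) := by
      rw [show (256 : Nat) = 2 ^ 8 from rfl, ← Nat.pow_mul]
    have : 8 * (bs.length + 1) = 8 * bs.length + 8 := by omega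
    rw [this, Nat.pow_add]
    calc b.toNat * 256 ^ bs.length + bs.foldl (fun a b => 256 * a + b.toNat) 0
        < b.toNat * 256 ^ bs.length + 2 ^ (8 * bs.length) := by omega
      _ ≤ 255 * 256 ^ bs.length + 2 ^ (8 * bs.length) := by
          have := Nat.mul_le_mul_right (256 ^ bs.length) (by omega : b.toNat ≤ 255)
          omega
      _ ≤ 2 ^ (8 * bs.length) * 2 ^ 8 := by rw [h256]; ring_nf; omega

theorem flatten_eq_bitsBE : ∀ bs : List Int, (∀ x ∈ bs, 0 ≤ x ∧ x < 256) →
    (bs.map uint8_to_bits).flatten = bitsBE (8 * bs.length) (pvFromBytes bs) := by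
  intro bs
  induction bs with
  | nil => intro _; simp [bitsBE, pvFromBytes]
  | cons b bs ih =>
    intro h
    have hb := h b (by simp)
    have hrest : ∀ x ∈ bs, 0 ≤ x ∧ x < 256 := fun x hx => h x (by simp [hx])
    have hbn : b.toNat < 256 := by omega
    have hbcast : (b.toNat : Int) = b := Int.toNat_of_nonneg hb.1
    have hV : pvFromBytes (b :: bs)
        = b.toNat * 2 ^ (8 * bs.length) + pvFromBytes bs := by
      simp only [pvFromBytes, List.foldl_cons, Nat.mul_zero, Nat.zero_add]
      rw [foldl_fromBytes_shift bs b.toNat]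
      congr 1
      rw [show (256 : Nat) = 2 ^ 8 from rfl, ← Nat.pow_mul]
    have hlt := fromBytes_lt bs hrest
    have hlen : 8 * (b :: bs).length = 8 + 8 * bs.length := by simp; omega
    rw [List.map_cons, List.flatten_cons, ih hrest, hlen, bitsBE_split]
    congr 1
    · -- high 8 bits
      have hdiv : pvFromBytes (b :: bs) / 2 ^ (8 * bs.length) = b.toNat := by
        rw [hV, Nat.mul_comm (b.toNat), Nat.mul_add_div (Nat.two_pow_pos _)]
        rw [Nat.div_eq_of_lt hlt]
        omega
      rw [hdiv, ← uint8_bits_byte b.toNat hbn, hbcast]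
    · -- low bits
      have hmodeq : pvFromBytes (b :: bs) % 2 ^ (8 * bs.length)
          = pvFromBytes bs % 2 ^ (8 * bs.length) := by
        rw [hV, Nat.mul_comm (b.toNat), Nat.mul_add_mod]
      rw [← bitsBE_mod (8 * bs.length) (8 * bs.length) (pvFromBytes (b :: bs)) le_rfl,
          hmodeq, bitsBE_mod (8 * bs.length) (8 * bs.length) (pvFromBytes bs) le_rfl]

-- ===== VERDICT (by name: the statement is the Claim_ definition above) =====
theorem common_prefix_bits_len_spec : Claim_equal_common_prefix_bits_len := by
  intro b1 b2 _ hpre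
  obtain ⟨hlen, h1, h2⟩ := hpre
  unfold Spec_common_prefix_bits_len common_prefix_bits_len common_prefix_bits_len_alt
  simp only
  rw [flatten_eq_bitsBE b1 h1, flatten_eq_bitsBE b2 h2, ← hlen]
  set L := 8 * b1.length with hL
  set v1 := pvFromBytes b1
  set v2 := pvFromBytes b2
  have hlen1 : (bitsBE L v1).length = L := length_bitsBE L v1
  have hlen2 : (bitsBE L v2).length = L := length_bitsBE L v2
  rw [pvScanA_eq (bitsBE L v2) (bitsBE L v1) 0 (by omega)]
  simp only [List.drop_zero, Nat.zero_add]
  rw [firstDiff_bitsBE]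
  have hx1 : v1 < 2 ^ L := fromBytes_lt b1 h1
  have hx2 : v2 < 2 ^ L := by rw [hL, hlen]; exact fromBytes_lt b2 h2
  have hxlt : v1 ^^^ v2 < 2 ^ L := Nat.xor_lt_two_pow hx1 hx2
  rw [Nat.mod_eq_of_lt hxlt]
  by_cases hz : v1 ^^^ v2 = 0
  · rw [hz, if_pos rfl]
    simp only [Nat.size_zero, Nat.sub_zero]
    rw [hL]; push_cast [Int.natCast_mul]; ring
  · rw [if_neg hz]
    have hsz : Nat.size (v1 ^^^ v2) ≤ L := Nat.size_le.2 hxlt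
    rw [hL] at hsz ⊢
    push_cast
    omega
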